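-- pv_equiv track=rewrite | github.com/pradeepm91/npw_org | app.py | compute_subtree_sizes
-- ===== SOURCE A (Python) =====
-- def compute_subtree_sizes(
--     children: dict[int, list[int]],
--     root_id: int,
--     allowed: set[int] | None = None,
-- ) -> dict[int, int]:
--     memo = {}
--
--     def dfs(n: int, stack: set[int]) -> int:
--         if n in memo:
--             return memo[n]
--         if n in stack:
--             return 0
--         stack.add(n)
--         size = 1
--         for c in children.get(n, []):
--             if allowed is not None and c not in allowed:
--                 continue
--             size += dfs(c, stack)
--         stack.remove(n)
--         memo[n] = size
--         return size
--
--     if allowed is None or root_id in allowed: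
--         dfs(root_id, set())
--     return memo
-- ===== SOURCE B (Python) =====
-- def compute_subtree_sizes(
--     children: dict[int, list[int]],
--     root_id: int,
--     allowed: set[int] | None = None,
-- ) -> dict[int, int]:
--     memo = {}
--     if allowed is not None and root_id not in allowed:
--         return memo
--     path = set()
--     # frames: [node, remaining children to process, accumulated size]
--     frames = [[root_id, list(children.get(root_id, [])), 1]]
--     path.add(root_id)
--     while frames:
--         top = frames[-1]
--         if top[1]:
--             c = top[1].pop(0)
--             if allowed is not None and c not in allowed:
--                 continue
--             if c in memo:
--                 top[2] += memo[c]
--             elif c in path: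
--                 pass  # on the current path: a cycle contributes 0
--             else:
--                 path.add(c)
--                 frames.append([c, list(children.get(c, [])), 1])
--         else:
--             frames.pop()
--             path.remove(top[0])
--             memo[top[0]] = top[2]
--             if frames:
--                 frames[-1][2] += top[2]
--     return memo
-- ===== Notes on version B (the rewrite author's own statement) =====
-- stated objective: alternative
-- what changed: Replaces the recursive memoized DFS (nested closure mutating memo and the path set) by an iterative DFS over an explicit stack of (node, remaining-children, accumulated-size) frames with the same memo dict and path set.
import Mathlib
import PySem

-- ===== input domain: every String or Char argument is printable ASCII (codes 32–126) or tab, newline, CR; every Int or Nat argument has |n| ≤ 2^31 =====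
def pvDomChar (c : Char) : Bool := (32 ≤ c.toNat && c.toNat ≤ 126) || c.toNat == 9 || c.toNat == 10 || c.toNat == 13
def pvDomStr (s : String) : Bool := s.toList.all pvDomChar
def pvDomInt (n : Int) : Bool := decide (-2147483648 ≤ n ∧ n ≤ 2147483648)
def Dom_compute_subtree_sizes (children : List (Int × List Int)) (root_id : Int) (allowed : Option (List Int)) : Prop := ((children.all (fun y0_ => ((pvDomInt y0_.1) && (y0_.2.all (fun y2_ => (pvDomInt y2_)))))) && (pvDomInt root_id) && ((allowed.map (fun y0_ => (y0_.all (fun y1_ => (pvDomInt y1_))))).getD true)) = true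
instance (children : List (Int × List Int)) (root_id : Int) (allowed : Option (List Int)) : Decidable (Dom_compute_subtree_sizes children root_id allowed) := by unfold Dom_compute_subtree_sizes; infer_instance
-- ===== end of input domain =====

-- B rewrites A's recursive memoized DFS as an iterative DFS over an explicit stack of
-- (node, remaining children, accumulated size) frames with the same memo dict and path set
-- (objective: alternative decomposition, same asymptotic cost).
-- Python `stack`/`path` are sets used only for membership, and additions/removals are LIFO
-- (always the most recently added node), so both are ported exactly as the list of nodes on
-- the current path (add = cons, remove = tail of that list, membership unchanged).

-- ===== PORT A =====
-- children.get(n, []) on the dict built from the association list (duplicate keys: last value wins,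
-- as in Python's dict construction)
def kidsOf (children : List (Int × List Int)) (n : Int) : List Int :=
  (PySem.Dict.ofList children).getD n []

-- 'allowed is not None and c not in allowed'
def skipChild (allowed : Option (List Int)) (c : Int) : Bool :=
  match allowed with
  | none => false
  | some al => !al.contains c

-- fuel guard: the recursion depth is bounded by the number of distinct nodes reachable on a
-- path (root plus all child ids), so this fuel is never exhausted (proved in suffDfs below)
def aFuel (children : List (Int × List Int)) : Nat :=
  (children.flatMap (fun p => p.2)).length + 2

mutual
-- the inner closure dfs(n, stack); none = fuel exhausted (never happens at aFuel)
def dfsA (children : List (Int × List Int)) (allowed : Option (List Int)) :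
    Nat → Int → List Int → PySem.Dict Int Int → Option (Int × PySem.Dict Int Int)
  | 0, _, _, _ => none
  | fuel+1, n, path, memo =>
    match memo.get? n with
    | some v => some (v, memo)
    | none =>
      if path.contains n then some (0, memo)
      else
        match loopA children allowed fuel (kidsOf children n) 1 (n :: path) memo with
        | none => none
        | some (sz, m) => some (sz, m.insert n sz)
termination_by fuel _ _ _ => (fuel, 0)

-- the 'for c in children.get(n, [])' loop, threading (size, memo); path already contains n
def loopA (children : List (Int × List Int)) (allowed : Option (List Int)) :
    Nat → List Int → Int → List Int → PySem.Dict Int Int → Option (Int × PySem.Dict Int Int)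
  | _, [], sz, _, memo => some (sz, memo)
  | fuel, c :: ks, sz, path, memo =>
    if skipChild allowed c then loopA children allowed fuel ks sz path memo
    else
      match dfsA children allowed fuel c path memo with
      | none => none
      | some (v, m) => loopA children allowed fuel ks (sz + v) path m
termination_by fuel ks _ _ _ => (fuel, ks.length + 1)
end

def compute_subtree_sizes (children : List (Int × List Int)) (root_id : Int) (allowed : Option (List Int)) : List (Int × Int) :=
  if (match allowed with | none => true | some al => al.contains root_id) then
    match dfsA children allowed (aFuel children) root_id [] PySem.Dict.empty with
    | some (_, m) => m.items
    | none => []   -- unreachable: aFuel suffices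
  else PySem.Dict.empty.items

-- ===== PORT B =====
-- fuel guard for the machine: an over-approximation of the number of machine steps needed
-- (never exhausted; derived in the simulation lemmas below)
def cFuel (K : Nat) : Nat → Nat
  | 0 => 1
  | f+1 => 1 + K * (1 + cFuel K f)

def bFuel (children : List (Int × List Int)) : Nat :=
  cFuel (children.flatMap (fun p => p.2)).length (aFuel children)

-- the while loop: frames of (node, remaining children, accumulated size);
-- none = fuel exhausted (never happens at bFuel)
def runB (children : List (Int × List Int)) (allowed : Option (List Int)) :
    Nat → List (Int × List Int × Int) → List Int → PySem.Dict Int Int → Option (PySem.Dict Int Int)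
  | 0, _, _, _ => none
  | _+1, [], _, memo => some memo
  | fuel+1, (n, c :: ks, sz) :: rest, path, memo =>
    if skipChild allowed c then runB children allowed fuel ((n, ks, sz) :: rest) path memo
    else
      match memo.get? c with
      | some v => runB children allowed fuel ((n, ks, sz + v) :: rest) path memo
      | none =>
        if path.contains c then runB children allowed fuel ((n, ks, sz) :: rest) path memo
        else runB children allowed fuel ((c, kidsOf children c, 1) :: (n, ks, sz) :: rest) (c :: path) memo
  | fuel+1, (n, [], sz) :: rest, path, memo =>
    -- pop the finished frame: path.remove(n) where n is the most recently added path node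
    let memo' := memo.insert n sz
    let path' := path.tail
    match rest with
    | [] => some memo'
    | (p, ks, s) :: r => runB children allowed fuel ((p, ks, s + sz) :: r) path' memo'

def compute_subtree_sizes_alt (children : List (Int × List Int)) (root_id : Int) (allowed : Option (List Int)) : List (Int × Int) :=
  if (match allowed with | none => true | some al => al.contains root_id) then
    match runB children allowed (bFuel children) [(root_id, kidsOf children root_id, 1)] [root_id] PySem.Dict.empty with
    | some m => m.items
    | none => []   -- unreachable: bFuel suffices
  else PySem.Dict.empty.items

-- ===== PRECONDITION & SPEC =====
def Spec_compute_subtree_sizes (children : List (Int × List Int)) (root_id : Int) (allowed : Option (List Int)) (out : List (Int × Int)) : Prop := out = compute_subtree_sizes_alt children root_id allowed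
instance (children : List (Int × List Int)) (root_id : Int) (allowed : Option (List Int)) (out : List (Int × Int)) : Decidable (Spec_compute_subtree_sizes children root_id allowed out) := by unfold Spec_compute_subtree_sizes; infer_instance

-- ===== CLAIM (what is proved, stated in full; the proofs are below) =====
def Claim_equal_compute_subtree_sizes : Prop := ∀ (children : List (Int × List Int)) (root_id : Int) (allowed : Option (List Int)), Dom_compute_subtree_sizes children root_id allowed → Spec_compute_subtree_sizes children root_id allowed (compute_subtree_sizes children root_id allowed)

-- ===== LEMMAS AND PROOFS =====

-- every item of the built dict has one of the association list's values
lemma items_insert_sub {kappa nu : Type} [BEq kappa] (d : PySem.Dict kappa nu) (k : kappa) (v : nu) (q : kappa × nu)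
    (h : q ∈ (d.insert k v).items) : q ∈ d.items ∨ q.2 = v := by
  unfold PySem.Dict.insert at h
  split at h
  · simp only [List.mem_map] at h
    obtain ⟨p, hp, he⟩ := h
    by_cases hc : (p.1 == k) = true
    · right; simp [hc] at he; simp [← he]
    · left; simp [hc] at he; simpa [← he]
  · simp only [List.mem_append, List.mem_singleton] at h
    rcases h with h | h
    · exact Or.inl h
    · right; simp [h]

lemma items_update_sub {kappa nu : Type} [BEq kappa] (ps : List (kappa × nu)) (d : PySem.Dict kappa nu) (q : kappa × nu)
    (h : q ∈ (d.update ps).items) : q ∈ d.items ∨ q.2 ∈ ps.map (fun p => p.2) := by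
  induction ps generalizing d with
  | nil => exact Or.inl h
  | cons p ps ih =>
    rcases ih (d.insert p.1 p.2) h with h' | h'
    · rcases items_insert_sub d p.1 p.2 q h' with h'' | h''
      · exact Or.inl h''
      · right; simp [h'']
    · right; simp [h']

lemma values_ofList (children : List (Int × List Int)) (n : Int) (l : List Int)
    (h : (PySem.Dict.ofList children).get? n = some l) : l ∈ children.map (fun p => p.2) := by
  unfold PySem.Dict.get? at h
  rcases Option.map_eq_some_iff.mp h with ⟨q, hq, hv⟩
  have := items_update_sub children PySem.Dict.empty q (List.mem_of_find?_eq_some hq)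
  simpa [PySem.Dict.empty, hv] using this

lemma kids_sublist (children : List (Int × List Int)) (n : Int) :
    (kidsOf children n).Sublist (children.flatMap (fun p => p.2)) := by
  unfold kidsOf PySem.Dict.getD
  cases h : (PySem.Dict.ofList children).get? n with
  | none => simp
  | some l =>
    have hm := values_ofList children n l h
    rw [List.flatMap_def]
    simpa using List.sublist_flatten_of_mem hm

lemma kids_mem_allKids (children : List (Int × List Int)) (n c : Int)
    (hc : c ∈ kidsOf children n) : c ∈ children.flatMap (fun p => p.2) :=
  (kids_sublist children n).subset hc

lemma kids_length_le (children : List (Int × List Int)) (n : Int) :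
    (kidsOf children n).length ≤ (children.flatMap (fun p => p.2)).length :=
  (kids_sublist children n).length_le

-- A's fuel is sufficient: the recursion depth is bounded by the nodes of S not yet on the path
lemma suffLoop (children : List (Int × List Int)) (allowed : Option (List Int)) (S : Finset Int)
    (f : Nat)
    (Hdfs : ∀ (n : Int) (path : List Int) (memo : PySem.Dict Int Int),
      n ∈ S → (∀ x ∈ path, x ∈ S) → (S \ path.toFinset).card < f →
      dfsA children allowed f n path memo ≠ none) :
    ∀ (ks : List Int) (sz : Int) (path : List Int) (memo : PySem.Dict Int Int),
      (∀ c ∈ ks, c ∈ S) → (∀ x ∈ path, x ∈ S) → (S \ path.toFinset).card < f →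
      loopA children allowed f ks sz path memo ≠ none := by
  intro ks
  induction ks with
  | nil => intro sz path memo _ _ _; simp [loopA]
  | cons c ks ih =>
    intro sz path memo hks hp hcard
    simp only [loopA]
    split
    · exact ih sz path memo (fun x hx => hks x (List.mem_cons_of_mem _ hx)) hp hcard
    · cases hd : dfsA children allowed f c path memo with
      | none => exact absurd hd (Hdfs c path memo (hks c List.mem_cons_self) hp hcard)
      | some r =>
        obtain ⟨v, m⟩ := r
        exact ih (sz + v) path m (fun x hx => hks x (List.mem_cons_of_mem _ hx)) hp hcard

lemma suffDfs (children : List (Int × List Int)) (allowed : Option (List Int)) (S : Finset Int)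
    (HS : ∀ m c, c ∈ kidsOf children m → c ∈ S) :
    ∀ (f : Nat) (n : Int) (path : List Int) (memo : PySem.Dict Int Int),
      n ∈ S → (∀ x ∈ path, x ∈ S) → (S \ path.toFinset).card < f →
      dfsA children allowed f n path memo ≠ none := by
  intro f
  induction f with
  | zero => intro n path memo _ _ hcard; exact absurd hcard (Nat.not_lt_zero _)
  | succ f ih =>
    intro n path memo hn hp hcard
    simp only [dfsA]
    cases hm : memo.get? n with
    | some v => simp
    | none =>
      simp only
      by_cases hnmem : n ∈ path
      · simp [hnmem]
      · rw [if_neg (by simpa using hnmem)]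
        have hcard' : (S \ (n :: path).toFinset).card < f := by
          have hins : (n :: path).toFinset = insert n path.toFinset := by simp
          rw [hins, Finset.sdiff_insert]
          have hnS : n ∈ S \ path.toFinset := by
            simp only [Finset.mem_sdiff, List.mem_toFinset]
            exact ⟨hn, hnmem⟩
          rw [Finset.card_erase_of_mem hnS]
          have hpos : 0 < (S \ path.toFinset).card := Finset.card_pos.mpr ⟨n, hnS⟩
          omega
        have hloop := suffLoop children allowed S f ih (kidsOf children n) 1 (n :: path) memo
          (fun c hcm => HS n c hcm)
          (by intro x hx; rcases List.mem_cons.mp hx with h | h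
              · exact h ▸ hn
              · exact hp x h)
          hcard'
        cases hl : loopA children allowed f (kidsOf children n) 1 (n :: path) memo with
        | none => exact absurd hl hloop
        | some r => obtain ⟨sz, m⟩ := r; simp

-- B's machine, after finishing a node's frame with value v and memo m, resumes the parent frame
def popCont (children : List (Int × List Int)) (allowed : Option (List Int))
    (g : Nat) (rest : List (Int × List Int × Int)) (v : Int) (path : List Int)
    (m : PySem.Dict Int Int) : Option (PySem.Dict Int Int) :=
  match rest with
  | [] => some m
  | (p, ks, s) :: r => runB children allowed g ((p, ks, s + v) :: r) path m

lemma simLoop (children : List (Int × List Int)) (allowed : Option (List Int)) (f : Nat)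
    (Hdfs : ∀ (n : Int) (path : List Int) (memo : PySem.Dict Int Int) (v : Int) (m2 : PySem.Dict Int Int),
      dfsA children allowed f n path memo = some (v, m2) →
      memo.get? n = none → path.contains n = false →
      ∃ k, k ≤ cFuel (children.flatMap (fun p => p.2)).length f ∧
        ∀ (g : Nat) (rest : List (Int × List Int × Int)),
          runB children allowed (g + k) ((n, kidsOf children n, 1) :: rest) (n :: path) memo =
            popCont children allowed g rest v path m2) :
    ∀ (ks : List Int) (n : Int) (path : List Int) (memo : PySem.Dict Int Int) (sz sz' : Int) (m2 : PySem.Dict Int Int),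
      loopA children allowed f ks sz (n :: path) memo = some (sz', m2) →
      ∃ k, k ≤ ks.length * (1 + cFuel (children.flatMap (fun p => p.2)).length f) + 1 ∧
        ∀ (g : Nat) (rest : List (Int × List Int × Int)),
          runB children allowed (g + k) ((n, ks, sz) :: rest) (n :: path) memo =
            popCont children allowed g rest sz' path (m2.insert n sz') := by
  intro ks
  induction ks with
  | nil =>
    intro n path memo sz sz' m2 h
    simp only [loopA, Option.some.injEq, Prod.mk.injEq] at h
    obtain ⟨rfl, rfl⟩ := h
    refine ⟨1, by omega, ?_⟩
    intro g rest
    simp only [runB, List.tail_cons]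
    cases rest with
    | nil => rfl
    | cons fr r => obtain ⟨p, ks2, s⟩ := fr; rfl
  | cons c ks ih =>
    intro n path memo sz sz' m2 h
    simp only [loopA] at h
    by_cases hskip : skipChild allowed c = true
    · rw [if_pos hskip] at h
      obtain ⟨k', hk', H⟩ := ih n path memo sz sz' m2 h
      refine ⟨k' + 1, ?_, ?_⟩
      · have e : (ks.length + 1) * (1 + cFuel (children.flatMap (fun p => p.2)).length f)
            = ks.length * (1 + cFuel (children.flatMap (fun p => p.2)).length f)
              + (1 + cFuel (children.flatMap (fun p => p.2)).length f) := by ring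
        simp only [List.length_cons]; omega
      · intro g rest
        have e : g + (k' + 1) = (g + k') + 1 := by omega
        rw [e]
        simp only [runB, if_pos hskip]
        exact H g rest
    · rw [if_neg hskip] at h
      cases hd : dfsA children allowed f c (n :: path) memo with
      | none => rw [hd] at h; simp at h
      | some r =>
        obtain ⟨v, m⟩ := r
        rw [hd] at h
        have h' : loopA children allowed f ks (sz + v) (n :: path) m = some (sz', m2) := h
        clear h
        cases hm : memo.get? c with
        | some v0 =>
          -- memoized child: dfs returns the memo value and leaves memo unchanged
          cases f with
          | zero => exact absurd hd (by simp [dfsA])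
          | succ f1 =>
            simp only [dfsA, hm, Option.some.injEq, Prod.mk.injEq] at hd
            obtain ⟨rfl, rfl⟩ := hd
            obtain ⟨k', hk', H⟩ := ih n path memo (sz + v0) sz' m2 h'
            refine ⟨k' + 1, ?_, ?_⟩
            · have e : (ks.length + 1) * (1 + cFuel (children.flatMap (fun p => p.2)).length (f1+1))
                  = ks.length * (1 + cFuel (children.flatMap (fun p => p.2)).length (f1+1))
                    + (1 + cFuel (children.flatMap (fun p => p.2)).length (f1+1)) := by ring
              simp only [List.length_cons]; omega
            · intro g rest
              have e : g + (k' + 1) = (g + k') + 1 := by omega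
              rw [e]
              simp only [runB, if_neg hskip, hm]
              exact H g rest
        | none =>
          by_cases hc : (n :: path).contains c = true
          -- child on the current path: contributes 0, memo unchanged
          · cases f with
            | zero => exact absurd hd (by simp [dfsA])
            | succ f1 =>
              simp only [dfsA, hm, hc, if_true, Option.some.injEq, Prod.mk.injEq] at hd
              obtain ⟨rfl, rfl⟩ := hd
              rw [Int.add_zero] at h'
              obtain ⟨k', hk', H⟩ := ih n path memo sz sz' m2 h'
              refine ⟨k' + 1, ?_, ?_⟩
              · have e : (ks.length + 1) * (1 + cFuel (children.flatMap (fun p => p.2)).length (f1+1))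
                    = ks.length * (1 + cFuel (children.flatMap (fun p => p.2)).length (f1+1))
                      + (1 + cFuel (children.flatMap (fun p => p.2)).length (f1+1)) := by ring
                simp only [List.length_cons]; omega
              · intro g rest
                have e : g + (k' + 1) = (g + k') + 1 := by omega
                rw [e]
                simp only [runB, if_neg hskip, hm, hc, if_true]
                exact H g rest
          -- fresh child: push its frame; the machine completes it exactly as dfs does
          · have hcf : (n :: path).contains c = false := by simpa using hc
            obtain ⟨k1, hk1, H1⟩ := Hdfs c (n :: path) memo v m hd hm hcf
            obtain ⟨k2, hk2, H2⟩ := ih n path m (sz + v) sz' m2 h'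
            refine ⟨k1 + k2 + 1, ?_, ?_⟩
            · have e : (ks.length + 1) * (1 + cFuel (children.flatMap (fun p => p.2)).length f)
                  = ks.length * (1 + cFuel (children.flatMap (fun p => p.2)).length f)
                    + (1 + cFuel (children.flatMap (fun p => p.2)).length f) := by ring
              simp only [List.length_cons]; omega
            · intro g rest
              have e : g + (k1 + k2 + 1) = (((g + k2) + k1)) + 1 := by omega
              rw [e]
              simp only [runB, if_neg hskip, hm, hcf]
              have h1 := H1 (g + k2) ((n, ks, sz) :: rest)
              simp only [popCont] at h1
              rw [h1]
              exact H2 g rest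

lemma simDfs (children : List (Int × List Int)) (allowed : Option (List Int)) :
    ∀ (f : Nat) (n : Int) (path : List Int) (memo : PySem.Dict Int Int) (v : Int) (m2 : PySem.Dict Int Int),
      dfsA children allowed f n path memo = some (v, m2) →
      memo.get? n = none → path.contains n = false →
      ∃ k, k ≤ cFuel (children.flatMap (fun p => p.2)).length f ∧
        ∀ (g : Nat) (rest : List (Int × List Int × Int)),
          runB children allowed (g + k) ((n, kidsOf children n, 1) :: rest) (n :: path) memo =
            popCont children allowed g rest v path m2 := by
  intro f
  induction f with
  | zero => intro n path memo v m2 hd; exact absurd hd (by simp [dfsA])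
  | succ f ih =>
    intro n path memo v m2 hd hm hc
    simp only [dfsA, hm, hc] at hd
    cases hl : loopA children allowed f (kidsOf children n) 1 (n :: path) memo with
    | none => rw [hl] at hd; exact absurd hd (by simp)
    | some r =>
      obtain ⟨sz, m⟩ := r
      rw [hl] at hd
      obtain ⟨rfl, rfl⟩ : sz = v ∧ m.insert n sz = m2 := by simpa using hd
      obtain ⟨k, hk, H⟩ := simLoop children allowed f ih (kidsOf children n) n path memo 1 _ _ hl
      refine ⟨k, ?_, H⟩
      have hlen := kids_length_le children n
      have hmul : (kidsOf children n).length * (1 + cFuel (children.flatMap (fun p => p.2)).length f)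
          ≤ (children.flatMap (fun p => p.2)).length * (1 + cFuel (children.flatMap (fun p => p.2)).length f) :=
        Nat.mul_le_mul_right _ hlen
      simp only [cFuel]
      omega

-- ===== VERDICT (by name: the statement is the Claim_ definition above) =====
theorem compute_subtree_sizes_spec : Claim_equal_compute_subtree_sizes := by
  intro children root_id allowed _dom
  unfold Spec_compute_subtree_sizes compute_subtree_sizes compute_subtree_sizes_alt
  cases hg : (match allowed with | none => true | some al => al.contains root_id) with
  | false => rfl
  | true =>
    set S : Finset Int := insert root_id ((children.flatMap (fun p => p.2)).toFinset) with hSdef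
    have HS : ∀ m c, c ∈ kidsOf children m → c ∈ S := by
      intro m c hcm
      exact Finset.mem_insert_of_mem (List.mem_toFinset.mpr (kids_mem_allKids children m c hcm))
    have hcard : (S \ ([] : List Int).toFinset).card < aFuel children := by
      have h1 : S.card ≤ (children.flatMap (fun p => p.2)).toFinset.card + 1 := Finset.card_insert_le _ _
      have h2 : (children.flatMap (fun p => p.2)).toFinset.card ≤ (children.flatMap (fun p => p.2)).length :=
        List.toFinset_card_le _
      simp only [List.toFinset_nil, Finset.sdiff_empty, aFuel]
      omega
    have hne := suffDfs children allowed S HS (aFuel children) root_id [] PySem.Dict.empty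
      (Finset.mem_insert_self _ _) (by intro x hx; cases hx) hcard
    cases hA : dfsA children allowed (aFuel children) root_id [] PySem.Dict.empty with
    | none => exact absurd hA hne
    | some r =>
      obtain ⟨v, m⟩ := r
      obtain ⟨k, hk, H⟩ := simDfs children allowed (aFuel children) root_id [] PySem.Dict.empty v m hA
        (PySem.Dict.get?_empty _) rfl
      have hkb : k ≤ bFuel children := hk
      have hrun := H (bFuel children - k) []
      rw [Nat.sub_add_cancel hkb] at hrun
      simp only [popCont] at hrun
      rw [hrun]
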